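-- pv_equiv track=rewrite | github.com/verisimilitude20201/competitive-programming | Common_Coding_Patterns/Two_Pointers/remove_a_key_from_array_and_return_length.py | remove_a_key_from_array_and_return_length
-- ===== SOURCE A (Python) =====
-- def remove_a_key_from_array_and_return_length(arr, key):
--     if len(arr) == 0:
--         return 0
--
--     last_non_key_index = 0
--     for i in range(len(arr)):
--         if arr[i] != key:
--             arr[last_non_key_index] = arr[i]
--             last_non_key_index += 1
--
--     return last_non_key_index
-- ===== SOURCE B (Python) =====
-- def remove_a_key_from_array_and_return_length(arr, key):
--     return len(arr) - arr.count(key)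
-- ===== Notes on version B (the rewrite author's own statement) =====
-- stated objective: simpler
-- what changed: Replaces the in-place two-pointer compaction loop with pure arithmetic: the new length is len(arr) minus arr.count(key), so no elements are gathered or written at all; equivalence is about the return value only (A also compacts arr in place, B does not mutate it).
import Mathlib
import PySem

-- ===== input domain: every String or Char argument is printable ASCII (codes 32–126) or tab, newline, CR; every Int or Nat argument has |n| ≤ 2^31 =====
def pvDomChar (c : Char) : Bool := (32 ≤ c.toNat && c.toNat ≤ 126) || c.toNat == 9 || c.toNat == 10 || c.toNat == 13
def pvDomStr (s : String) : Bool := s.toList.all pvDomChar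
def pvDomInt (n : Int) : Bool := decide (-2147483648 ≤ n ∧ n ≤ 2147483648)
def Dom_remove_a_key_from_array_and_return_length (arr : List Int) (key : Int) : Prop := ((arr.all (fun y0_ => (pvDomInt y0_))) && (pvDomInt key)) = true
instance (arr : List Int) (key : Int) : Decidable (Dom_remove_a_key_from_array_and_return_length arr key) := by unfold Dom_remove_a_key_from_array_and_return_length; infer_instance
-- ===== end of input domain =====

-- B replaces A's in-place two-pointer compaction by arithmetic: len(arr) - arr.count(key); the equivalence
-- proved is about the RETURN value only (A compacts arr in place, B does not mutate it).

-- ===== PORT A =====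
-- A's loop: for i in range(len(arr)): if arr[i] != key: arr[last]=arr[i]; last += 1.
-- State is the mutated list together with last_non_key_index (kept as a Nat index since
-- 0 ≤ last ≤ i always holds; List.set is exact for Python's in-range arr[last] = v).
def remove_a_key_from_array_and_return_length (arr : List Int) (key : Int) : Int :=
  if arr.length = 0 then 0
  else
    let st := (List.range arr.length).foldl
      (fun (s : List Int × Nat) i =>
        match s.1[i]? with
        | some v => if v ≠ key then (s.1.set s.2 v, s.2 + 1) else s
        | none => s)
      (arr, 0)
    (st.2 : Int)

-- ===== PORT B =====
-- B: return len(arr) - arr.count(key)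
def remove_a_key_from_array_and_return_length_alt (arr : List Int) (key : Int) : Int :=
  (arr.length : Int) - (PySem.List.count arr key : Int)

-- ===== PRECONDITION & SPEC =====
def Spec_remove_a_key_from_array_and_return_length (arr : List Int) (key : Int) (out : Int) : Prop := out = remove_a_key_from_array_and_return_length_alt arr key
instance (arr : List Int) (key : Int) (out : Int) : Decidable (Spec_remove_a_key_from_array_and_return_length arr key out) := by unfold Spec_remove_a_key_from_array_and_return_length; infer_instance

-- ===== CLAIM (what is proved, stated in full; the proofs are below) =====
def Claim_equal_remove_a_key_from_array_and_return_length : Prop := ∀ (arr : List Int) (key : Int), Dom_remove_a_key_from_array_and_return_length arr key → Spec_remove_a_key_from_array_and_return_length arr key (remove_a_key_from_array_and_return_length arr key)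

-- ===== LEMMAS AND PROOFS =====

-- Loop invariant after processing indices 0..i-1: the counter equals the number of
-- non-key elements among the first i originals, the list keeps its length, and the
-- tail from position i onwards is still the original (writes only touch indices < i).
lemma removeKey_loop_inv (arr : List Int) (key : Int) (i : Nat) (hi : i ≤ arr.length) :
    let st := (List.range i).foldl
      (fun (s : List Int × Nat) j =>
        match s.1[j]? with
        | some v => if v ≠ key then (s.1.set s.2 v, s.2 + 1) else s
        | none => s)
      (arr, 0)
    st.2 = ((arr.take i).filter (fun x => x ≠ key)).length ∧
    st.1.length = arr.length ∧
    st.1.drop i = arr.drop i ∧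
    st.2 ≤ i := by
  induction i with
  | zero => simp
  | succ n ih =>
    have hn : n ≤ arr.length := Nat.le_of_succ_le hi
    obtain ⟨hc, hl, hd, hle⟩ := ih hn
    simp only [List.range_succ, List.foldl_append, List.foldl_cons, List.foldl_nil]
    revert hc hl hd hle
    generalize (List.range n).foldl
      (fun (s : List Int × Nat) j =>
        match s.1[j]? with
        | some v => if v ≠ key then (s.1.set s.2 v, s.2 + 1) else s
        | none => s)
      (arr, 0) = st
    obtain ⟨a, c⟩ := st
    intro hc hl hd hle
    simp only at hc hl hd hle
    have hnlt : n < arr.length := hi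
    have hget : a[n]? = arr[n]? := by
      have h1 := congrArg (fun l => l[0]?) hd
      simpa [List.getElem?_drop] using h1
    have hgetv : a[n]? = some arr[n] := by
      rw [hget]; exact List.getElem?_eq_getElem hnlt
    have htake : arr.take (n+1) = arr.take n ++ [arr[n]] :=
      List.take_succ_eq_append_getElem hnlt
    have hdropsucc : ∀ (l : List Int), l.drop n = arr.drop n → l.drop (n+1) = arr.drop (n+1) := by
      intro l hl'
      have : l.drop (n+1) = (l.drop n).drop 1 := by rw [List.drop_drop]
      rw [this, hl', List.drop_drop]
    simp only [hgetv]
    by_cases hk : arr[n] = key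
    · rw [if_neg (by simpa using hk)]
      refine ⟨?_, hl, hdropsucc a hd, by omega⟩
      rw [htake, List.filter_append, hc]
      simp [hk]
    · rw [if_pos (by simpa using hk)]
      refine ⟨?_, by simp [hl], ?_, by omega⟩
      · rw [htake, List.filter_append, hc]
        simp [hk]
      · rw [show (a.set c arr[n]).drop (n+1) = a.drop (n+1) from
          List.drop_set_of_lt (by omega)]
        exact hdropsucc a hd

-- The survivor count equals length minus the key's multiplicity.
lemma filter_ne_length_eq (arr : List Int) (key : Int) :
    ((arr.filter (fun x => x ≠ key)).length : Int)
      = (arr.length : Int) - (arr.count key : Int) := by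
  induction arr with
  | nil => simp
  | cons x xs ih =>
    by_cases h : x = key
    · simpa [h] using ih
    · simp [h] at ih ⊢
      omega

-- ===== VERDICT (by name: the statement is the Claim_ definition above) =====
theorem remove_a_key_from_array_and_return_length_spec : Claim_equal_remove_a_key_from_array_and_return_length := by
  intro arr key _
  unfold Spec_remove_a_key_from_array_and_return_length
  unfold remove_a_key_from_array_and_return_length remove_a_key_from_array_and_return_length_alt
  rw [PySem.List.count_eq]
  by_cases h : arr.length = 0
  · simp [List.eq_nil_of_length_eq_zero h]
  · rw [if_neg h]
    have hinv := (removeKey_loop_inv arr key arr.length le_rfl).1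
    simp only [List.take_length] at hinv
    exact Eq.trans (congrArg Int.ofNat hinv) (filter_ne_length_eq arr key)
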